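-- pv_equiv track=rewrite | github.com/InoriNatsume/ExifBased_namer | core/utils/tag_sets.py | remove_common_tags
-- ===== SOURCE A (Python) =====
-- from typing import Iterable
--
-- def compute_common_tags(tag_lists: Iterable[Iterable[str]]) -> list[str]:
--     lists = [list(tags) for tags in tag_lists]
--     if not lists:
--         return []
--
--     common_set = set(lists[0])
--     for tags in lists[1:]:
--         common_set.intersection_update(tags)
--
--     ordered: list[str] = []
--     seen: set[str] = set()
--     for tag in lists[0]:
--         if tag in common_set and tag not in seen:
--             ordered.append(tag)
--             seen.add(tag)
--     return ordered
--
-- def remove_common_tags(tag_lists: Iterable[Iterable[str]]) -> tuple[list[list[str]], list[str]]: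
--     lists = [list(tags) for tags in tag_lists]
--     common_tags = compute_common_tags(lists)
--     common_set = set(common_tags)
--     unique_lists = [
--         [tag for tag in tags if tag not in common_set] for tags in lists
--     ]
--     return unique_lists, common_tags
-- ===== SOURCE B (Python) =====
-- def remove_common_tags(tag_lists):
--     lists = [list(tags) for tags in tag_lists]
--     n = len(lists)
--     if n == 0:
--         return [], []
--     counts = {}
--     for tags in lists:
--         for tag in set(tags):
--             counts[tag] = counts.get(tag, 0) + 1
--     common_tags = []
--     for tag in lists[0]:
--         if counts.get(tag, 0) == n and tag not in common_tags:
--             common_tags.append(tag)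
--     common = set(common_tags)
--     unique_lists = [[tag for tag in tags if tag not in common] for tags in lists]
--     return unique_lists, common_tags
-- ===== Notes on version B (the rewrite author's own statement) =====
-- stated objective: alternative
-- what changed: Replaces the iterative set-intersection with a one-shot occurrence counter over distinct tags per list (a tag is common iff its count equals the number of lists), and drops the auxiliary 'seen' set in favour of checking the output list being built.
import Mathlib
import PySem

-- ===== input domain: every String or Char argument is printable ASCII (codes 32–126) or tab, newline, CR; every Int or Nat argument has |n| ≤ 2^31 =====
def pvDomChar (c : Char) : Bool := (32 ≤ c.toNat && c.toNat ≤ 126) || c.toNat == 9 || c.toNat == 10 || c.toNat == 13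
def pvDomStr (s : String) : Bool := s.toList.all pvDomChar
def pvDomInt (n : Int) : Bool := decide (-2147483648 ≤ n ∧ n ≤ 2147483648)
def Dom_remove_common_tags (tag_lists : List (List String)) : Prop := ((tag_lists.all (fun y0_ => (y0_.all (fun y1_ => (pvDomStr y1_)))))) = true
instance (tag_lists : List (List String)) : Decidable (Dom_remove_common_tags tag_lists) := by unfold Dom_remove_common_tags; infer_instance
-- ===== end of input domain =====

-- B: builds a per-tag occurrence counter once (common iff count = number of lists) instead of
-- iteratively intersecting sets; same results, alternative algorithm (no speed claim).

-- ===== PORT A =====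
def compute_common_tags (tag_lists : List (List String)) : List String :=
  match tag_lists with
  | [] => []
  | l0 :: rest =>
    let commonSet := rest.foldl (fun s tags => PySem.Set.inter s tags) (PySem.Set.ofList l0)
    let p := l0.foldl (fun (acc : List String × PySem.Set String) tag =>
        if commonSet.contains tag && !(acc.2.contains tag) then (acc.1 ++ [tag], PySem.Set.add acc.2 tag) else acc)
      ([], PySem.Set.empty)
    p.1

def remove_common_tags (tag_lists : List (List String)) : List (List String) × List String :=
  let common_tags := compute_common_tags tag_lists
  let common_set := PySem.Set.ofList common_tags
  let unique_lists := tag_lists.map (fun tags => tags.filter (fun tag => !(PySem.Set.contains common_set tag)))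
  (unique_lists, common_tags)

-- ===== PORT B =====
def remove_common_tags_alt (tag_lists : List (List String)) : List (List String) × List String :=
  match tag_lists with
  | [] => ([], [])
  | l0 :: rest =>
    let lists := l0 :: rest
    let n := lists.length
    let counts := lists.foldl
      (fun d tags => (PySem.Set.ofList tags).foldl (fun d t => PySem.Dict.modify d t 0 (· + 1)) d)
      PySem.Dict.empty
    let common_tags := l0.foldl
      (fun (acc : List String) tag =>
        if (PySem.Dict.getD counts tag 0 == (n : Int)) && !(acc.contains tag) then acc ++ [tag] else acc)
      []
    let common := PySem.Set.ofList common_tags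
    let unique_lists := lists.map (fun tags => tags.filter (fun tag => !(PySem.Set.contains common tag)))
    (unique_lists, common_tags)

-- ===== PRECONDITION & SPEC =====
def Spec_remove_common_tags (tag_lists : List (List String)) (out : List (List String) × List String) : Prop := out = remove_common_tags_alt tag_lists
instance (tag_lists : List (List String)) (out : List (List String) × List String) : Decidable (Spec_remove_common_tags tag_lists out) := by unfold Spec_remove_common_tags; infer_instance

-- ===== CLAIM (what is proved, stated in full; the proofs are below) =====
def Claim_equal_remove_common_tags : Prop := ∀ (tag_lists : List (List String)), Dom_remove_common_tags tag_lists → Spec_remove_common_tags tag_lists (remove_common_tags tag_lists)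

-- ===== LEMMAS AND PROOFS =====

-- membership in A's iterated intersection
theorem mem_foldl_inter (rest : List (List String)) (s : PySem.Set String) (t : String) :
    (t ∈ rest.foldl (fun s tags => PySem.Set.inter s tags) s) ↔ (t ∈ s ∧ ∀ l ∈ rest, t ∈ l) := by
  induction rest generalizing s with
  | nil => simp
  | cons l ls ih =>
    simp only [List.foldl_cons, ih, PySem.Set.mem_inter, List.mem_cons]
    constructor
    · rintro ⟨⟨h1, h2⟩, h3⟩
      exact ⟨h1, by rintro l' (rfl | hl'); exact h2; exact h3 l' hl'⟩
    · rintro ⟨h1, h2⟩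
      exact ⟨⟨h1, h2 l (Or.inl rfl)⟩, fun l' hl' => h2 l' (Or.inr hl')⟩

-- count of t in a deduplicated list is the membership indicator
theorem count_ofList (tags : List String) (t : String) :
    (PySem.Set.ofList tags).count t = if t ∈ tags then 1 else 0 := by
  have hnd := PySem.Set.nodup_ofList (xs := tags)
  by_cases h : t ∈ tags
  · simp [h]
  · simp [h, List.count_eq_zero.2 (fun hm => h ((PySem.Set.mem_ofList tags t).1 hm))]

-- B's counter counts the lists containing t
theorem getD_counts (lists : List (List String)) (d : PySem.Dict String Int) (t : String) :
    PySem.Dict.getD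
      (lists.foldl (fun d tags => (PySem.Set.ofList tags).foldl (fun d t => PySem.Dict.modify d t 0 (· + 1)) d) d)
      t 0
    = PySem.Dict.getD d t 0 + (lists.countP (fun l => t ∈ l) : Int) := by
  induction lists generalizing d with
  | nil => simp
  | cons l ls ih =>
    simp only [List.foldl_cons, ih, PySem.Dict.getD_foldl_modify_add_one, count_ofList,
      List.countP_cons]
    by_cases h : t ∈ l <;> simp [h]; ring_nf

-- collapse A's (ordered, seen) pair: seen always equals ordered
theorem fold_collapse (c : String → Bool) (l : List String) (acc : List String) :
    (l.foldl (fun (p : List String × PySem.Set String) tag =>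
        if c tag && !(p.2.contains tag) then (p.1 ++ [tag], PySem.Set.add p.2 tag) else p) (acc, acc)).1
    = l.foldl (fun acc tag => if c tag && !(acc.contains tag) then acc ++ [tag] else acc) acc := by
  induction l generalizing acc with
  | nil => rfl
  | cons x xs ih =>
    simp only [List.foldl_cons]
    by_cases h : (c x && !(acc.contains x)) = true
    · have h' : (c x && !(PySem.Set.contains acc x)) = true := by simpa using h
      have hx : x ∉ acc := by
        have h2 := h
        simp at h2
        exact h2.2
      have hadd : PySem.Set.add acc x = acc ++ [x] := by
        simp [PySem.Set.add, hx]
      rw [if_pos h', if_pos h, hadd]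
      exact ih (acc ++ [x])
    · have h' : ¬ (c x && !(PySem.Set.contains acc x)) = true := by simpa using h
      rw [if_neg h', if_neg h]
      exact ih acc

-- the two guard predicates agree
theorem guard_eq (l0 : List String) (rest : List (List String)) (t : String) :
    PySem.Set.contains
      (rest.foldl (fun s tags => PySem.Set.inter s tags) (PySem.Set.ofList l0)) t
    = (PySem.Dict.getD
        ((l0 :: rest).foldl (fun d tags => (PySem.Set.ofList tags).foldl (fun d t => PySem.Dict.modify d t 0 (· + 1)) d) PySem.Dict.empty)
        t 0 == ((l0 :: rest).length : Int)) := by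
  rw [getD_counts]
  have h0 : (PySem.Dict.empty : PySem.Dict String Int).getD t 0 = 0 := rfl
  rw [h0, zero_add]
  have hcp : (l0 :: rest).countP (fun l => t ∈ l) = (l0 :: rest).length ↔ ∀ l ∈ (l0 :: rest), t ∈ l := by
    constructor
    · intro h l hl
      have := (List.countP_eq_length (p := fun l => decide (t ∈ l)) (l := l0 :: rest)).1 (by simpa using h) l hl
      simpa using this
    · intro h
      simpa using (List.countP_eq_length (p := fun l => decide (t ∈ l)) (l := l0 :: rest)).2 (by simpa using h)
  by_cases hall : ∀ l ∈ (l0 :: rest), t ∈ l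
  · have hmem : t ∈ rest.foldl (fun s tags => PySem.Set.inter s tags) (PySem.Set.ofList l0) := by
      rw [mem_foldl_inter]
      exact ⟨(PySem.Set.mem_ofList l0 t).2 (hall l0 (by simp)), fun l hl => hall l (by simp [hl])⟩
    have h1 : PySem.Set.contains (rest.foldl (fun s tags => PySem.Set.inter s tags) (PySem.Set.ofList l0)) t = true :=
      (PySem.Set.contains_iff _ _).2 hmem
    rw [h1, hcp.2 hall]
    simp
  · have hmem : t ∉ rest.foldl (fun s tags => PySem.Set.inter s tags) (PySem.Set.ofList l0) := by
      rw [mem_foldl_inter]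
      rintro ⟨h1, h2⟩
      refine hall ?_
      intro l hl
      rcases List.mem_cons.1 hl with rfl | hl'
      · exact (PySem.Set.mem_ofList _ _).1 h1
      · exact h2 l hl' 
    have h1 : PySem.Set.contains (rest.foldl (fun s tags => PySem.Set.inter s tags) (PySem.Set.ofList l0)) t = false := by
      cases hc : PySem.Set.contains (rest.foldl (fun s tags => PySem.Set.inter s tags) (PySem.Set.ofList l0)) t
      · rfl
      · exact absurd ((PySem.Set.contains_iff _ _).1 hc) hmem
    have h2 : (l0 :: rest).countP (fun l => t ∈ l) ≠ (l0 :: rest).length := fun h => hall (hcp.1 h)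
    rw [h1]
    symm
    simp only [beq_iff_eq, Bool.eq_false_iff, ne_eq]
    intro h
    exact h2 (by exact_mod_cast h)

theorem common_tags_eq (tag_lists : List (List String)) :
    compute_common_tags tag_lists = (remove_common_tags_alt tag_lists).2 := by
  cases tag_lists with
  | nil => rfl
  | cons l0 rest =>
    show (l0.foldl _ ([], PySem.Set.empty)).1 = l0.foldl _ []
    have he : (PySem.Set.empty : PySem.Set String) = ([] : List String) := rfl
    rw [show (([], PySem.Set.empty) : List String × PySem.Set String) = (([] : List String), ([] : List String)) from rfl]
    rw [fold_collapse (fun tag => PySem.Set.contains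
      (rest.foldl (fun s tags => PySem.Set.inter s tags) (PySem.Set.ofList l0)) tag) l0 []]
    apply PySem.List.foldl_congr_mem
    intro acc tag _
    rw [guard_eq l0 rest tag]

-- ===== VERDICT (by name: the statement is the Claim_ definition above) =====
theorem remove_common_tags_spec : Claim_equal_remove_common_tags := by
  intro tag_lists _
  unfold Spec_remove_common_tags
  cases h : tag_lists with
  | nil => rfl
  | cons l0 rest =>
    have hct := common_tags_eq (l0 :: rest)
    show (_, compute_common_tags (l0 :: rest)) = _
    rw [hct]
    rfl
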